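-- pv_equiv track=rewrite | github.com/2303A52302/AI_ASSISTANT_COADING | ass-13.5.py | generate_lucas_sequence
-- ===== SOURCE A (Python) =====
-- def generate_lucas_sequence(n):
--     """
--     Generate Lucas sequence up to n terms.
--
--     Lucas sequence starts with 2, 1 and follows: Ln = Ln-1 + Ln-2
--
--     Args:
--         n (int): Number of terms to generate
--
--     Returns:
--         list: First n Lucas numbers
--     """
--     if n <= 0:
--         return []
--     elif n == 1:
--         return [2]
--
--     lucas = [2, 1]
--     for i in range(2, n):
--         lucas.append(lucas[i-1] + lucas[i-2])
--     return lucas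
-- ===== SOURCE B (Python) =====
-- def generate_lucas_sequence(n):
--     """Lucas numbers via the identity L_k = F_(k-1) + F_(k+1):
--     first build the Fibonacci list [F_-1, F_0, ..., F_n], then combine
--     it with itself shifted by two."""
--     fib = []  # fib[i] = F_(i-1): 1, 0, 1, 1, 2, 3, ...
--     a, b = 1, 0
--     for _ in range(n + 2):
--         fib.append(a)
--         a, b = b, a + b
--     return [x + y for x, y in zip(fib, fib[2:])]
-- ===== Notes on version B (the rewrite author's own statement) =====
-- stated objective: alternative
-- what changed: B computes Lucas numbers indirectly via the identity L_k = F_(k-1) + F_(k+1): it first builds the Fibonacci list [F_-1..F_n] in one pass, then produces the result in a second pass by summing that list zipped with its 2-shifted tail, instead of A's direct Lucas recurrence with guard branches and list-index reads.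
import Mathlib
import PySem

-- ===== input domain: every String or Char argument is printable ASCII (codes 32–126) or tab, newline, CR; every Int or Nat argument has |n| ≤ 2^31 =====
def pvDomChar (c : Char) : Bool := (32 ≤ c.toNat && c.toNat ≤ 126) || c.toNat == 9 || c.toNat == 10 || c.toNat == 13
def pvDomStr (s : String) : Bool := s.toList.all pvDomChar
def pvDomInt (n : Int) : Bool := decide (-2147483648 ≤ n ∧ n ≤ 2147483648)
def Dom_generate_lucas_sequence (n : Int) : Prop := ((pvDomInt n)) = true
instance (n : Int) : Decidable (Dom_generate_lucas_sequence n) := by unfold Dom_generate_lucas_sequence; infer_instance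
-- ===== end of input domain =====

-- B computes Lucas numbers via the Fibonacci identity L_k = F_(k-1) + F_(k+1): one pass builds
-- the Fibonacci list, a second pass sums it with its 2-shift (objective: alternative algorithm).

-- ===== PORT A =====
-- lucas[i-1], lucas[i-2] are always in range in A's loop, so pyGetD with default 0 is exact here
def generate_lucas_sequence (n : Int) : List Int :=
  if n ≤ 0 then []
  else if n = 1 then [2]
  else
    (PySem.List.pyRange 2 n 1).foldl
      (fun lucas i =>
        lucas ++ [PySem.List.pyGetD lucas (i - 1) 0 + PySem.List.pyGetD lucas (i - 2) 0])
      [2, 1]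

-- ===== PORT B =====
-- the 'for _ in range(n + 2): fib.append(a); a, b = b, a + b' loop, recursion on the trip count
def fibLoop : Nat → Int → Int → List Int
  | 0, _, _ => []
  | k + 1, a, b => a :: fibLoop k b (a + b)

-- '[x + y for x, y in zip(fib, fib[2:])]'
def generate_lucas_sequence_alt (n : Int) : List Int :=
  let fib := fibLoop (n + 2).toNat 1 0
  (fib.zip (PySem.List.slice fib (some 2) none)).map (fun p => p.1 + p.2)

-- ===== PRECONDITION & SPEC =====
def Spec_generate_lucas_sequence (n : Int) (out : List Int) : Prop := out = generate_lucas_sequence_alt n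
instance (n : Int) (out : List Int) : Decidable (Spec_generate_lucas_sequence n out) := by unfold Spec_generate_lucas_sequence; infer_instance

-- ===== CLAIM (what is proved, stated in full; the proofs are below) =====
def Claim_equal_generate_lucas_sequence : Prop := ∀ (n : Int), Dom_generate_lucas_sequence n → Spec_generate_lucas_sequence n (generate_lucas_sequence n)

-- ===== LEMMAS AND PROOFS =====

-- proof-only reference loop: the direct Lucas recurrence on two rolling scalars
def lucasLoop : Nat → Int → Int → List Int
  | 0, _, _ => []
  | k + 1, a, b => a :: lucasLoop k b (a + b)

def lucasStep (p : Int × Int) : Int × Int := (p.2, p.1 + p.2)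

theorem lucasLoop_length (k : Nat) (a b : Int) : (lucasLoop k a b).length = k := by
  induction k generalizing a b with
  | zero => rfl
  | succ k ih => simp [lucasLoop, ih]

theorem fibLoop_length (k : Nat) (a b : Int) : (fibLoop k a b).length = k := by
  induction k generalizing a b with
  | zero => rfl
  | succ k ih => simp [fibLoop, ih]

theorem lucasLoop_succ (k : Nat) (a b : Int) :
    lucasLoop (k + 1) a b = lucasLoop k a b ++ [(lucasStep^[k] (a, b)).1] := by
  induction k generalizing a b with
  | zero => rfl
  | succ k ih =>
    rw [lucasLoop, ih, lucasLoop]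
    simp [Function.iterate_succ_apply, lucasStep]

theorem lucasStep_fst_add (k : Nat) (p : Int × Int) :
    (lucasStep^[k] p).1 + (lucasStep^[k + 1] p).1 = (lucasStep^[k + 2] p).1 := by
  rw [Function.iterate_succ_apply' lucasStep (k + 1), Function.iterate_succ_apply' lucasStep k]
  simp [lucasStep]

theorem lucas_invariant (j : Nat) :
    (PySem.List.pyRange 2 ((j : Int) + 2) 1).foldl
      (fun lucas i =>
        lucas ++ [PySem.List.pyGetD lucas (i - 1) 0 + PySem.List.pyGetD lucas (i - 2) 0])
      [2, 1] = lucasLoop (j + 2) 2 1 := by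
  induction j with
  | zero => decide
  | succ j ih =>
    have hsplit : PySem.List.pyRange 2 ((j : Int) + 1 + 2) 1
        = PySem.List.pyRange 2 ((j : Int) + 2) 1 ++ [(j : Int) + 2] := by
      have := PySem.List.pyRange_one_succ_right (a := 2) (b := (j : Int) + 2) (by omega)
      rw [show (j : Int) + 1 + 2 = ((j : Int) + 2) + 1 by ring, this]
    rw [show ((j + 1 : Nat) : Int) + 2 = (j : Int) + 1 + 2 by push_cast; ring]
    rw [hsplit, List.foldl_append, ih]
    rw [lucasLoop_succ (j + 1) 2 1, lucasLoop_succ j 2 1]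
    simp only [List.foldl_cons, List.foldl_nil]
    have hlen : (lucasLoop j 2 1).length = j := lucasLoop_length j 2 1
    have hidx1 : ((j : Int) + 2) - 1 = ((j + 1 : Nat) : Int) := by push_cast; ring
    have hidx2 : ((j : Int) + 2) - 2 = ((j : Nat) : Int) := by ring
    rw [hidx1, hidx2, PySem.List.pyGetD_natCast, PySem.List.pyGetD_natCast]
    have hget1 : (lucasLoop j 2 1 ++ [(lucasStep^[j] (2, 1)).1] ++ [(lucasStep^[j + 1] (2, 1)).1]).getD (j + 1) 0
        = (lucasStep^[j + 1] (2, 1)).1 := by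
      rw [List.getD_eq_getElem?_getD, List.getElem?_append_right (by simp [hlen])]
      simp [hlen]
    have hget2 : (lucasLoop j 2 1 ++ [(lucasStep^[j] (2, 1)).1] ++ [(lucasStep^[j + 1] (2, 1)).1]).getD j 0
        = (lucasStep^[j] (2, 1)).1 := by
      rw [List.getD_eq_getElem?_getD, List.append_assoc,
        List.getElem?_append_right (by omega)]
      simp [hlen]
    rw [hget1, hget2]
    rw [lucasLoop_succ (j + 1 + 1) 2 1, lucasLoop_succ (j + 1) 2 1, lucasLoop_succ j 2 1]
    rw [show (lucasStep^[j + 1] (2, 1)).1 + (lucasStep^[j] (2, 1)).1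
        = (lucasStep^[j + 2] (2, 1)).1 by rw [add_comm]; exact lucasStep_fst_add j (2, 1)]

theorem A_eq_lucasLoop (n : Int) : generate_lucas_sequence n = lucasLoop n.toNat 2 1 := by
  unfold generate_lucas_sequence
  by_cases h0 : n ≤ 0
  · simp [h0, Int.toNat_of_nonpos h0, lucasLoop]
  · by_cases h1 : n = 1
    · subst h1; decide
    · have h2 : 2 ≤ n := by omega
      have hj : n = ((n - 2).toNat : Int) + 2 := by omega
      rw [if_neg h0, if_neg h1]
      rw [hj, lucas_invariant (n - 2).toNat]
      congr 1

-- zipping a Fibonacci-style loop with a 2-offset copy of itself gives the Lucas-style loop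
theorem zip_fibLoop (k : Nat) :
    ∀ (m : Nat), k ≤ m → ∀ (a b c d : Int),
    ((fibLoop m a b).zip (fibLoop k c d)).map (fun p => p.1 + p.2) = lucasLoop k (a + c) (b + d) := by
  induction k with
  | zero => intro m _ a b c d; simp [fibLoop, lucasLoop]
  | succ k ih =>
    intro m hm a b c d
    obtain ⟨m', rfl⟩ : ∃ m', m = m' + 1 := ⟨m - 1, by omega⟩
    simp only [fibLoop, List.zip_cons_cons, List.map_cons, lucasLoop]
    rw [ih m' (by omega)]
    congr 1
    ring_nf

theorem B_eq_lucasLoop (n : Int) : generate_lucas_sequence_alt n = lucasLoop n.toNat 2 1 := by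
  unfold generate_lucas_sequence_alt
  show ((fibLoop (n + 2).toNat 1 0).zip
      (PySem.List.slice (fibLoop (n + 2).toNat 1 0) (some 2) none)).map (fun p => p.1 + p.2)
      = lucasLoop n.toNat 2 1
  rw [PySem.List.slice_from (ha := by norm_num)]
  by_cases h0 : n ≤ 0
  · -- fib has length ≤ 1, so its 2-drop is [] and the zip is empty
    have hlen : (fibLoop (n + 2).toNat 1 0).length = (n + 2).toNat := fibLoop_length _ 1 0
    have hdrop : (fibLoop (n + 2).toNat 1 0).drop (2 : Int).toNat = [] := by
      apply List.drop_eq_nil_of_le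
      omega
    rw [hdrop]
    simp [Int.toNat_of_nonpos h0, lucasLoop]
  · have hn : (n + 2).toNat = n.toNat + 2 := by omega
    rw [hn]
    show ((fibLoop (n.toNat + 2) 1 0).zip ((fibLoop (n.toNat + 2) 1 0).drop 2)).map (fun p => p.1 + p.2) = _
    rw [show fibLoop (n.toNat + 2) 1 0 = 1 :: 0 :: fibLoop n.toNat 1 1 by simp [fibLoop]]
    rw [show (((1 : Int) :: 0 :: fibLoop n.toNat 1 1).drop 2) = fibLoop n.toNat 1 1 from rfl]
    rw [show ((1 : Int) :: 0 :: fibLoop n.toNat 1 1) = fibLoop (n.toNat + 2) 1 0 by simp [fibLoop]]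
    rw [zip_fibLoop n.toNat (n.toNat + 2) (by omega) 1 0 1 1]
    norm_num

-- ===== VERDICT (by name: the statement is the Claim_ definition above) =====
theorem generate_lucas_sequence_spec : Claim_equal_generate_lucas_sequence := by
  intro n _
  unfold Spec_generate_lucas_sequence
  rw [A_eq_lucasLoop, B_eq_lucasLoop]
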